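-- pv_equiv track=rewrite | github.com/IntegralHamster/AoC-2023 | 7.py | ordering1
-- ===== SOURCE A (Python) =====
-- card_sub = {
--     '2': "B",
--     '3': "C",
--     '4': "D",
--     '5': "E",
--     '6': "F",
--     '7': "G",
--     '8': "H",
--     '9': "I",
--     'T': "L",
--     'J': "M",
--     'Q': "N",
--     'K': "O",
--     'A': "P"
-- }
--
-- def ordering1(hand_s):
--     for hand in hand_s:
--         hand_l = list(hand[0])
--         for i in range(len(hand_l)):
--             hand_l[i] = card_sub[hand_l[i]]
--         hand_count = []
--         for i in set(sorted(hand_l)):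
--             hand_count.append(str(hand_l.count(i)))
--         hand_count = sorted(hand_count, reverse=True)
--         hand[0] = "".join(hand_l)
--         hand.append("".join(hand_count))
--     return hand_s
-- ===== SOURCE B (Python) =====
-- card_sub = {
--     '2': "B",
--     '3': "C",
--     '4': "D",
--     '5': "E",
--     '6': "F",
--     '7': "G",
--     '8': "H",
--     '9': "I",
--     'T': "L",
--     'J': "M",
--     'Q': "N",
--     'K': "O",
--     'A': "P"
-- }
--
-- def ordering1(hand_s):
--     # Mutates each hand in place, like the original.
--     for hand in hand_s:
--         subbed = [card_sub[c] for c in hand[0]]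
--         hand[0] = "".join(subbed)
--         counts = []
--         run = 0
--         prev = None
--         for c in sorted(subbed):
--             if c == prev:
--                 run += 1
--             else:
--                 if run:
--                     counts.append(str(run))
--                 run = 1
--                 prev = c
--         if run:
--             counts.append(str(run))
--         counts.sort(reverse=True)
--         hand.append("".join(counts))
--     return hand_s
-- ===== Notes on version B (the rewrite author's own statement) =====
-- stated objective: alternative
-- what changed: Replaces the set-plus-repeated-.count rescans with one linear pass over a sorted copy of the substituted cards that accumulates consecutive run lengths to form the count signature.
import Mathlib
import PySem

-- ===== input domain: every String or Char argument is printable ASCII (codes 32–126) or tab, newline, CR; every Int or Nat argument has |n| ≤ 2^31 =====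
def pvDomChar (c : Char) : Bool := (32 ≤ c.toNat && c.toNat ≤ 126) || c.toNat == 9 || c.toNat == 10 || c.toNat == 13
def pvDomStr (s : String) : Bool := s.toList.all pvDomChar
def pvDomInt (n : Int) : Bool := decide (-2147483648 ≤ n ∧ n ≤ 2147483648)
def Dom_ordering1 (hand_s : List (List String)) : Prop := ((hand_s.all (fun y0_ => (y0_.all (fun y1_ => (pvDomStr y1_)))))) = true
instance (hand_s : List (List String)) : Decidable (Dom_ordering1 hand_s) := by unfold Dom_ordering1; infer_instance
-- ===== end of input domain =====

-- B replaces the set + repeated .count rescans by one run-length pass over a sorted copy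
-- of the substituted hand (alternative decomposition, no speed claim).
-- Both A and B mutate each inner hand list in place (hand[0] = …, hand.append(…)) and
-- return hand_s; the equivalence proved here is about the return value.

-- ===== PORT A =====
def cardSub : PySem.Dict Char String := PySem.Dict.mk [('2', "B"), ('3', "C"), ('4', "D"), ('5', "E"), ('6', "F"), ('7', "G"),
   ('8', "H"), ('9', "I"), ('T', "L"), ('J', "M"), ('Q', "N"), ('K', "O"), ('A', "P")]

-- card_sub[c]; KeyError (missing key) is excluded by Pre_ordering1, "" is never read there
def subD (c : Char) : String := (PySem.Dict.get? cardSub c).getD ""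

def ordering1 (hand_s : List (List String)) : List (List String) :=
  hand_s.map (fun hand =>
    -- hand[0]; IndexError on an empty hand is excluded by Pre_ordering1
    let hand_l : List String := (hand.headD "").toList.map (fun c => subD c)
    let hand_count : List String :=
      (PySem.Set.ofList (PySem.List.sorted hand_l (fun x => x) false)).map
        (fun i => PySem.Int.toStr (PySem.List.count hand_l i : Int))
    let hand_count := PySem.List.sorted hand_count (fun x => x) true
    PySem.Str.join "" hand_l :: hand.tail ++ [PySem.Str.join "" hand_count])

-- ===== PORT B =====
-- loop state: (counts, run, prev)
def runStep (st : List String × Int × Option String) (c : String) :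
    List String × Int × Option String :=
  if st.2.2 = some c then (st.1, st.2.1 + 1, st.2.2)
  else ((if st.2.1 ≠ 0 then st.1 ++ [PySem.Int.toStr st.2.1] else st.1), 1, some c)

def runFlush (st : List String × Int × Option String) : List String :=
  if st.2.1 ≠ 0 then st.1 ++ [PySem.Int.toStr st.2.1] else st.1

def ordering1_alt (hand_s : List (List String)) : List (List String) :=
  hand_s.map (fun hand =>
    let subbed : List String := (hand.headD "").toList.map (fun c => subD c)
    let counts : List String :=
      runFlush ((PySem.List.sorted subbed (fun x => x) false).foldl runStep ([], 0, none))
    let counts := PySem.List.sorted counts (fun x => x) true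
    PySem.Str.join "" subbed :: hand.tail ++ [PySem.Str.join "" counts])

-- ===== PRECONDITION & SPEC =====
-- Pre_ excludes exactly the inputs on which A raises: an empty hand (IndexError on hand[0])
-- or a card character outside card_sub (KeyError).
def Pre_ordering1 (hand_s : List (List String)) : Prop :=
  (hand_s.all (fun hand =>
    !hand.isEmpty && (hand.headD "").toList.all (fun c => (PySem.Dict.get? cardSub c).isSome))) = true
instance (hand_s : List (List String)) : Decidable (Pre_ordering1 hand_s) := by
  unfold Pre_ordering1; infer_instance

def pvWitness_ordering1 : List (List String) := [["32T3K", "765"], ["KTJJT", "220"]]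

def Spec_ordering1 (hand_s : List (List String)) (out : List (List String)) : Prop := out = ordering1_alt hand_s
instance (hand_s : List (List String)) (out : List (List String)) : Decidable (Spec_ordering1 hand_s out) := by unfold Spec_ordering1; infer_instance

-- ===== CLAIM (what is proved, stated in full; the proofs are below) =====
def Claim_equal_ordering1 : Prop := ∀ (hand_s : List (List String)), Dom_ordering1 hand_s → Pre_ordering1 hand_s → Spec_ordering1 hand_s (ordering1 hand_s)

-- ===== LEMMAS AND PROOFS =====

-- Set.ofList unfolds a cons to head plus the later distinct elements other than the head
theorem foldl_add_eq (t : List String) : ∀ (s : PySem.Set String),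
    t.foldl PySem.Set.add s
      = s ++ (PySem.Set.ofList t).filter (fun x => !PySem.Set.contains s x) := by
  induction t with
  | nil => intro s; simp [PySem.Set.ofList, PySem.Set.empty]
  | cons x t ih =>
    intro s
    have hofl : PySem.Set.ofList (x :: t)
        = [x] ++ (PySem.Set.ofList t).filter (fun y => !PySem.Set.contains [x] y) := by
      have h0 : PySem.Set.add ([] : PySem.Set String) x = [x] := by
        simp [PySem.Set.add, PySem.Set.contains]
      rw [PySem.Set.ofList_eq_foldl, List.foldl_cons, h0, ih [x]]
    rw [List.foldl_cons, ih (PySem.Set.add s x), hofl]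
    by_cases hm : x ∈ s
    · have hadd : PySem.Set.add s x = s := by simp [PySem.Set.add, PySem.Set.contains, hm]
      rw [hadd]
      simp only [List.filter_append, List.filter_filter]
      congr 1
      have hfx : List.filter (fun y => !PySem.Set.contains s y) [x] = [] := by
        simp [PySem.Set.contains, hm]
      rw [hfx, List.nil_append]
      apply List.filter_congr
      intro y _
      by_cases hy : y = x
      · subst hy; simp [PySem.Set.contains, hm]
      · simp [PySem.Set.contains, hy]
    · have hadd : PySem.Set.add s x = s ++ [x] := by
        simp [PySem.Set.add, PySem.Set.contains, hm]
      rw [hadd]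
      simp only [List.filter_append, List.filter_filter, List.append_assoc]
      congr 1
      have hfx : List.filter (fun y => !PySem.Set.contains s y) [x] = [x] := by
        simp [PySem.Set.contains, hm]
      rw [hfx]
      congr 1
      apply List.filter_congr
      intro y _
      by_cases hy : y = x
      · subst hy; simp [PySem.Set.contains, hm]
      · simp [PySem.Set.contains, hy, Bool.and_comm]

theorem ofList_cons (c : String) (t : List String) :
    PySem.Set.ofList (c :: t) = c :: (PySem.Set.ofList t).filter (fun x => x ≠ c) := by
  have h0 : PySem.Set.add ([] : PySem.Set String) c = [c] := by
    simp [PySem.Set.add, PySem.Set.contains]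
  rw [PySem.Set.ofList_eq_foldl, List.foldl_cons, h0, foldl_add_eq]
  simp only [List.singleton_append, List.cons.injEq, true_and]
  apply List.filter_congr
  intro y _
  simp [PySem.Set.contains, eq_comm]

-- main run-length invariant over a sorted list
theorem run_main (s : List String) : ∀ (counts : List String) (run : Int) (p : String),
    s.Pairwise (fun a b => a ≤ b) → (∀ x ∈ s, p ≤ x) → 0 < run →
    runFlush (s.foldl runStep (counts, run, some p))
      = counts ++ PySem.Int.toStr (run + (PySem.List.count s p : Int)) ::
          ((PySem.Set.ofList s).filter (fun x => x ≠ p)).map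
            (fun i => PySem.Int.toStr (PySem.List.count s i : Int)) := by
  induction s with
  | nil =>
    intro counts run p _ _ hrun
    have hne : run ≠ 0 := by omega
    simp [runFlush, hne, PySem.List.count, PySem.Set.ofList, PySem.Set.empty]
  | cons c t ih =>
    intro counts run p hpw hpx hrun
    have hpt : t.Pairwise (fun a b => a ≤ b) := hpw.tail
    have hct : ∀ x ∈ t, c ≤ x := fun x hx => (List.pairwise_cons.mp hpw).1 x hx
    have hpc : p ≤ c := hpx c (List.mem_cons_self ..)
    by_cases hpeq : p = c
    · subst hpeq
      have hstep : runStep (counts, run, some p) p = (counts, run + 1, some p) := by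
        simp [runStep]
      rw [List.foldl_cons, hstep, ih counts (run + 1) p hpt hct (by omega)]
      have hcnt : (PySem.List.count (p :: t) p : Int) = (PySem.List.count t p : Int) + 1 := by
        simp [PySem.List.count_eq]
      have hfil : (PySem.Set.ofList (p :: t)).filter (fun x => x ≠ p)
          = (PySem.Set.ofList t).filter (fun x => x ≠ p) := by
        rw [ofList_cons]
        simp [List.filter_filter]
      rw [hcnt, hfil]
      have harith : run + 1 + (PySem.List.count t p : Int)
          = run + ((PySem.List.count t p : Int) + 1) := by ring
      rw [harith]
      congr 2
      apply List.map_congr_left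
      intro i hi
      have hip : i ≠ p := of_decide_eq_true (List.mem_filter.mp hi).2
      congr 1
      simp [PySem.List.count_eq, Ne.symm hip]
    · have hplt : p < c := lt_of_le_of_ne hpc hpeq
      have hpnott : ∀ x, x ∈ (c :: t) → x ≠ p := by
        intro x hx
        rcases List.mem_cons.mp hx with h | h
        · subst h; exact fun he => hpeq he.symm
        · exact fun he => absurd (he ▸ hct x h) (not_le.mpr hplt)
      have hrne : run ≠ 0 := by omega
      have hstep : runStep (counts, run, some p)
          c = (counts ++ [PySem.Int.toStr run], 1, some c) := by
        simp [runStep, hrne]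
        intro h; exact absurd h hpeq
      rw [List.foldl_cons, hstep,
        ih (counts ++ [PySem.Int.toStr run]) 1 c hpt hct Int.one_pos]
      have hcp : (PySem.List.count (c :: t) p : Int) = 0 := by
        have : p ∉ c :: t := fun h => (hpnott p h) rfl
        simp [PySem.List.count_eq, List.count_eq_zero_of_not_mem this]
      have hfil : (PySem.Set.ofList (c :: t)).filter (fun x => x ≠ p)
          = c :: (PySem.Set.ofList t).filter (fun x => x ≠ c) := by
        rw [ofList_cons]
        have h1 : (decide (c ≠ p)) = true := by simp [Ne.symm hpeq]
        simp only [List.filter_cons, h1, if_pos]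
        congr 1
        rw [List.filter_filter]
        apply List.filter_congr
        intro y hy
        have hyt : y ∈ t := (PySem.Set.mem_ofList ..).mp hy
        simp [hpnott y (List.mem_cons_of_mem _ hyt)]
      rw [hcp, hfil]
      simp only [List.map_cons, List.append_assoc, List.singleton_append]
      have h2 : run + 0 = run := by ring
      rw [h2]
      congr 1
      have hcc : (PySem.List.count (c :: t) c : Int) = 1 + (PySem.List.count t c : Int) := by
        simp [PySem.List.count_eq]; ring
      rw [hcc]
      congr 2
      apply List.map_congr_left
      intro i hi
      have hic : i ≠ c := of_decide_eq_true (List.mem_filter.mp hi).2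
      congr 1
      simp [PySem.List.count_eq, Ne.symm hic]

theorem run_top (s : List String) (h : s.Pairwise (fun a b => a ≤ b)) :
    runFlush (s.foldl runStep ([], 0, none))
      = (PySem.Set.ofList s).map (fun i => PySem.Int.toStr (PySem.List.count s i : Int)) := by
  cases s with
  | nil => simp [runFlush, PySem.Set.ofList, PySem.Set.empty]
  | cons c t =>
    have hstep : runStep (([] : List String), (0 : Int), (none : Option String)) c
        = ([], 1, some c) := by simp [runStep]
    have hct : ∀ x ∈ t, c ≤ x := fun x hx => (List.pairwise_cons.mp h).1 x hx
    rw [List.foldl_cons, hstep, run_main t [] 1 c h.tail hct Int.one_pos]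
    rw [ofList_cons]
    simp only [List.map_cons, List.nil_append]
    have hcc : (PySem.List.count (c :: t) c : Int) = 1 + (PySem.List.count t c : Int) := by
      simp [PySem.List.count_eq]; ring
    rw [hcc]
    congr 1
    apply List.map_congr_left
    intro i hi
    have hic : i ≠ c := of_decide_eq_true (List.mem_filter.mp hi).2
    congr 1
    simp [PySem.List.count_eq, Ne.symm hic]

-- ===== VERDICT (by name: the statement is the Claim_ definition above) =====
theorem ordering1_spec : Claim_equal_ordering1 := by
  unfold Claim_equal_ordering1
  intro hand_s _ _
  unfold Spec_ordering1 ordering1 ordering1_alt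
  apply List.map_congr_left
  intro hand _
  simp only []
  congr 1
  congr 2
  set hand_l := (hand.headD "").toList.map (fun c => subD c) with hdef
  set s := PySem.List.sorted hand_l (fun x => x) false with hsdef
  have hpw : s.Pairwise (fun a b => a ≤ b) := PySem.List.sorted_pairwise hand_l (fun x => x)
  rw [run_top s hpw]
  congr 1
  apply List.map_congr_left
  intro i _
  congr 2
  simp only [PySem.List.count_eq]
  exact ((PySem.List.sorted_perm hand_l (fun x => x) false).count_eq i).symm
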